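-- pv_equiv track=rewrite | github.com/benlu-1/The-Trading-Game | app.py | get_best_bid_ask
-- ===== SOURCE A (Python) =====
-- def get_best_bid_ask(offers):
--     if offers is None or not isinstance(offers, list):
--         return None, None, None, None
--
--     best_bid, best_bid_player = None, None
--     best_ask, best_ask_player = None, None
--
--     for i, q in enumerate(offers):
--         if q is None:
--             continue
--         if best_bid is None or q["bid"] > best_bid:
--             best_bid, best_bid_player = q["bid"], i
--         if best_ask is None or q["ask"] < best_ask:
--             best_ask, best_ask_player = q["ask"], i
--
--     return best_bid, best_bid_player, best_ask, best_ask_player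
-- ===== SOURCE B (Python) =====
-- def get_best_bid_ask(offers):
--     if offers is None or not isinstance(offers, list):
--         return None, None, None, None
--     valid = [(i, q) for i, q in enumerate(offers) if q is not None]
--     if not valid:
--         return None, None, None, None
--     bid_i, bid_q = sorted(valid, key=lambda x: x[1]["bid"], reverse=True)[0]
--     ask_i, ask_q = sorted(valid, key=lambda x: x[1]["ask"])[0]
--     return bid_q["bid"], bid_i, ask_q["ask"], ask_i
-- ===== Notes on version B (the rewrite author's own statement) =====
-- stated objective: alternative
-- what changed: Replaced A's fused single-pass running-extremum loop with a filter pass followed by two stable sorts (by bid descending and by ask ascending) whose first elements give the answers; stability preserves A's earliest-index tie-breaking.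
import Mathlib
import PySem

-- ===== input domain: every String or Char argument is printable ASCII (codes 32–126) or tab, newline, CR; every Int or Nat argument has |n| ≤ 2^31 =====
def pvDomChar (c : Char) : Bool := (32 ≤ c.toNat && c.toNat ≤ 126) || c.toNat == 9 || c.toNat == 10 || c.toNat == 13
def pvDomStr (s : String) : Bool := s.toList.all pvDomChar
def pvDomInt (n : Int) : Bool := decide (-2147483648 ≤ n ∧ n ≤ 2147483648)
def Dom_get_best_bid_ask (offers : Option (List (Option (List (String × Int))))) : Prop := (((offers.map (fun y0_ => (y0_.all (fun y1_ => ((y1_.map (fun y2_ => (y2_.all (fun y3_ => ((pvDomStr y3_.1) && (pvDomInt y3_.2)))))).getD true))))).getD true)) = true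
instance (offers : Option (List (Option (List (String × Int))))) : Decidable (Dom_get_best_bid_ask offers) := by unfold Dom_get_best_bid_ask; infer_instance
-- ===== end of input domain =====

-- B replaces A's fused single-pass running-extremum loop by a filter pass plus two stable
-- sorts (bid descending, ask ascending) whose first elements give the answers (objective:
-- alternative algorithm; stability preserves A's earliest-index tie-breaking).

-- d[k] for the association-list encoding of a Python dict: first match; default 0 is
-- only reached where Python raises KeyError, which Pre_ excludes.
def pvItem (d : List (String × Int)) (k : String) : Int := (List.lookup k d).getD 0

-- ===== PORT A =====
-- A's loop body: the four running accumulators (best_bid, best_bid_player, best_ask, best_ask_player).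
def pvStepA (s : Option Int × Option Int × Option Int × Option Int)
    (iq : Int × Option (List (String × Int))) :
    Option Int × Option Int × Option Int × Option Int :=
  match iq.2 with
  | none => s
  | some q =>
    let s1 : Option Int × Option Int :=
      match s.1 with
      | none => (some (pvItem q "bid"), some iq.1)
      | some v => if pvItem q "bid" > v then (some (pvItem q "bid"), some iq.1) else (s.1, s.2.1)
    let s2 : Option Int × Option Int :=
      match s.2.2.1 with
      | none => (some (pvItem q "ask"), some iq.1)
      | some v => if pvItem q "ask" < v then (some (pvItem q "ask"), some iq.1) else (s.2.2.1, s.2.2.2)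
    (s1.1, s1.2, s2.1, s2.2)

def get_best_bid_ask (offers : Option (List (Option (List (String × Int))))) :
    Option Int × Option Int × Option Int × Option Int :=
  match offers with
  | none => (none, none, none, none)
  | some lst => (PySem.List.enumerate lst).foldl pvStepA (none, none, none, none)

-- ===== PORT B =====
def get_best_bid_ask_alt (offers : Option (List (Option (List (String × Int))))) :
    Option Int × Option Int × Option Int × Option Int :=
  match offers with
  | none => (none, none, none, none)
  | some lst =>
    let valid := (PySem.List.enumerate lst).filterMap
      (fun iq => iq.2.map (fun q => (iq.1, q)))
    match (PySem.List.sorted valid (fun x => pvItem x.2 "bid") true).head?,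
          (PySem.List.sorted valid (fun x => pvItem x.2 "ask") false).head? with
    | some b, some a =>
      (some (pvItem b.2 "bid"), some b.1, some (pvItem a.2 "ask"), some a.1)
    | _, _ => (none, none, none, none)

-- ===== PRECONDITION & SPEC =====
-- Pre_ excludes exactly the inputs where the Python raises KeyError (both A and B do):
-- some non-None quote dict lacking the "bid" or "ask" key.
def Pre_get_best_bid_ask (offers : Option (List (Option (List (String × Int))))) : Prop :=
  ∀ q ∈ offers.getD [],
    (q.map (fun d => (List.lookup "bid" d).isSome && (List.lookup "ask" d).isSome)).getD true = true
instance (offers : Option (List (Option (List (String × Int))))) : Decidable (Pre_get_best_bid_ask offers) := by unfold Pre_get_best_bid_ask; infer_instance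

def pvWitness_get_best_bid_ask : (Option (List (Option (List (String × Int))))) :=
  some [some [("bid", 3), ("ask", 5)], none, some [("bid", 2), ("ask", 4)]]

def Spec_get_best_bid_ask (offers : Option (List (Option (List (String × Int))))) (out : Option Int × Option Int × Option Int × Option Int) : Prop := out = get_best_bid_ask_alt offers
instance (offers : Option (List (Option (List (String × Int))))) (out : Option Int × Option Int × Option Int × Option Int) : Decidable (Spec_get_best_bid_ask offers out) := by unfold Spec_get_best_bid_ask; infer_instance

-- ===== CLAIM (what is proved, stated in full; the proofs are below) =====
def Claim_equal_get_best_bid_ask : Prop := ∀ (offers : Option (List (Option (List (String × Int))))), Dom_get_best_bid_ask offers → Pre_get_best_bid_ask offers → Spec_get_best_bid_ask offers (get_best_bid_ask offers)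

-- ===== LEMMAS AND PROOFS =====

-- running-extremum steps: what A's fused loop does to each half of its state
def pvMaxStep (acc : Option (Int × List (String × Int))) (x : Int × List (String × Int)) :
    Option (Int × List (String × Int)) :=
  match acc with
  | none => some x
  | some m => if pvItem m.2 "bid" < pvItem x.2 "bid" then some x else some m

def pvMinStep (acc : Option (Int × List (String × Int))) (x : Int × List (String × Int)) :
    Option (Int × List (String × Int)) :=
  match acc with
  | none => some x
  | some m => if pvItem x.2 "ask" < pvItem m.2 "ask" then some x else some m

-- reading A's four accumulator variables off the two extremal candidates
def pvImg (accB accA : Option (Int × List (String × Int))) :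
    Option Int × Option Int × Option Int × Option Int :=
  (accB.map (fun x => pvItem x.2 "bid"), accB.map (fun x => x.1),
   accA.map (fun x => pvItem x.2 "ask"), accA.map (fun x => x.1))

def pvValid (l : List (Int × Option (List (String × Int)))) : List (Int × List (String × Int)) :=
  l.filterMap (fun iq => iq.2.map (fun q => (iq.1, q)))

theorem pvLoop_eq (l : List (Int × Option (List (String × Int))))
    (accB accA : Option (Int × List (String × Int))) :
    l.foldl pvStepA (pvImg accB accA)
      = pvImg ((pvValid l).foldl pvMaxStep accB) ((pvValid l).foldl pvMinStep accA) := by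
  induction l generalizing accB accA with
  | nil => simp [pvValid]
  | cons hd tl ih =>
    obtain ⟨i, q⟩ := hd
    cases q with
    | none =>
      simpa [pvValid, List.foldl_cons, pvStepA] using ih accB accA
    | some d =>
      have hstep : pvStepA (pvImg accB accA) (i, some d)
          = pvImg (pvMaxStep accB (i, d)) (pvMinStep accA (i, d)) := by
        cases accB <;> cases accA <;>
          simp only [pvStepA, pvMaxStep, pvMinStep, pvImg, Option.map_none, Option.map_some] <;>
          split_ifs <;> simp_all
      have hv : pvValid ((i, some d) :: tl) = (i, d) :: pvValid tl := by
        simp [pvValid]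
      rw [hv, List.foldl_cons, List.foldl_cons, List.foldl_cons, hstep, ih]

-- the head of an insertBy-foldl evolves exactly as a running extremum
theorem pvHead_foldl_insertBy {α : Type} (before : α → α → Bool)
    (xs : List α) (acc : List α) :
    (xs.foldl (fun a x => PySem.List.insertBy before x a) acc).head?
      = xs.foldl
          (fun s x => match s with
            | none => some x
            | some m => if before x m then some x else some m)
          acc.head? := by
  induction xs generalizing acc with
  | nil => rfl
  | cons x t ih =>
    rw [List.foldl_cons, ih, List.foldl_cons]
    congr 1
    cases acc with
    | nil => rfl
    | cons y ys =>
      simp only [PySem.List.insertBy, List.head?_cons]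
      split_ifs <;> rfl

theorem pvHead_sorted_bid (v : List (Int × List (String × Int))) :
    (PySem.List.sorted v (fun x => pvItem x.2 "bid") true).head?
      = v.foldl pvMaxStep none := by
  rw [PySem.List.sorted_rev_eq_foldl_insertBy]
  rw [pvHead_foldl_insertBy]
  simp only [List.head?_nil]
  congr 1
  funext s x
  cases s with
  | none => rfl
  | some m => simp [pvMaxStep]

theorem pvHead_sorted_ask (v : List (Int × List (String × Int))) :
    (PySem.List.sorted v (fun x => pvItem x.2 "ask") false).head?
      = v.foldl pvMinStep none := by
  rw [PySem.List.sorted_eq_foldl_insertBy]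
  rw [pvHead_foldl_insertBy]
  simp only [List.head?_nil]
  congr 1
  funext s x
  cases s with
  | none => rfl
  | some m => simp [pvMinStep]

-- ===== VERDICT (by name: the statement is the Claim_ definition above) =====
theorem get_best_bid_ask_spec : Claim_equal_get_best_bid_ask := by
  intro offers _ _
  unfold Spec_get_best_bid_ask
  cases offers with
  | none => rfl
  | some lst =>
    have hA : get_best_bid_ask (some lst)
        = pvImg ((pvValid (PySem.List.enumerate lst)).foldl pvMaxStep none)
                ((pvValid (PySem.List.enumerate lst)).foldl pvMinStep none) := by
      have h := pvLoop_eq (PySem.List.enumerate lst) none none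
      simpa [get_best_bid_ask, pvImg] using h
    have halt : get_best_bid_ask_alt (some lst)
        = (match (PySem.List.sorted (pvValid (PySem.List.enumerate lst)) (fun x => pvItem x.2 "bid") true).head?,
                 (PySem.List.sorted (pvValid (PySem.List.enumerate lst)) (fun x => pvItem x.2 "ask") false).head? with
           | some b, some a =>
             (some (pvItem b.2 "bid"), some b.1, some (pvItem a.2 "ask"), some a.1)
           | _, _ => ((none : Option Int), (none : Option Int), (none : Option Int), (none : Option Int))) := rfl
    rw [hA, halt, pvHead_sorted_bid, pvHead_sorted_ask]
    cases hV : pvValid (PySem.List.enumerate lst) with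
    | nil => rfl
    | cons x t =>
      simp only [List.foldl_cons]
      rw [show pvMaxStep none x = some x from rfl, show pvMinStep none x = some x from rfl]
      have hmax : ∀ (u : List (Int × List (String × Int))) (m : Int × List (String × Int)),
          (u.foldl pvMaxStep (some m)).isSome := by
        intro u
        induction u with
        | nil => intro m; rfl
        | cons z u ih =>
          intro m
          simp only [List.foldl_cons, pvMaxStep]
          split_ifs <;> exact ih _
      have hmin : ∀ (u : List (Int × List (String × Int))) (m : Int × List (String × Int)),
          (u.foldl pvMinStep (some m)).isSome := by
        intro u
        induction u with
        | nil => intro m; rfl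
        | cons z u ih =>
          intro m
          simp only [List.foldl_cons, pvMinStep]
          split_ifs <;> exact ih _
      obtain ⟨b, hb⟩ := Option.isSome_iff_exists.mp (hmax t x)
      obtain ⟨a, ha⟩ := Option.isSome_iff_exists.mp (hmin t x)
      rw [hb, ha]
      rfl
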